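-- pv_equiv track=rewrite | github.com/duhyunkim1/algorithm | programmers/Lv.2/해시/방울.py | solution
-- ===== SOURCE A (Python) =====
-- def solution(bell):
--     bell = [-1 if b == 1 else 1 for b in bell]
--     bell_accum = [0]
--     for b in bell:
--         bell_accum.append(bell_accum[-1]+b)
--     start = {}
--     end = {}
--     for i, x in enumerate(bell_accum):
--         if x not in start:
--             start[x] = i
--         end[x] = i
--     return max(end[x] - start[x] for x in end)
-- ===== SOURCE B (Python) =====
-- def solution(bell):
--     p = [0]
--     for b in bell:
--         p.append(p[-1] + (-1 if b == 1 else 1))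
--     best = 0
--     for j in range(len(p)):
--         for i in range(j):
--             if p[i] == p[j] and j - i > best:
--                 best = j - i
--     return best
-- ===== Notes on version B (the rewrite author's own statement) =====
-- stated objective: simpler
-- what changed: Replaces A's first/last-occurrence dictionaries and final max-over-keys with a direct exhaustive scan over all index pairs of the prefix-sum walk, keeping a running best span.
import Mathlib
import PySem

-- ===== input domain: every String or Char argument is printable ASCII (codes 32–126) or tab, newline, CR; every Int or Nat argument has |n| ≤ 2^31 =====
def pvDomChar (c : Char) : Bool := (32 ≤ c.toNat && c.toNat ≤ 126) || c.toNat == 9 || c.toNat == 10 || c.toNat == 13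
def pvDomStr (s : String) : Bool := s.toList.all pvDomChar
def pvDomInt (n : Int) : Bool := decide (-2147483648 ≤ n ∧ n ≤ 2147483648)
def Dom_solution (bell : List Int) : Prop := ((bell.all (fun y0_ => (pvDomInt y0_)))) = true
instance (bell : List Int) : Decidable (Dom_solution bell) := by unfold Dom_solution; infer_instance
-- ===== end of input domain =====

-- B replaces A's first/last-occurrence dictionaries and final max-over-keys with a direct exhaustive scan over all index pairs of the prefix-sum walk (simpler, no dicts; quadratic, not faster).


-- ===== PORT A =====
-- bell = [-1 if b == 1 else 1 for b in bell]
def pvMapA (b : Int) : Int := if b == 1 then (-1 : Int) else 1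
-- bell_accum.append(bell_accum[-1] + b)   (bell_accum is never empty, so pyGetD's default is never read)
def pvAccStep (acc : List Int) (b : Int) : List Int := acc ++ [PySem.List.pyGetD acc (-1) 0 + b]
-- if x not in start: start[x] = i ; end[x] = i
def pvDictStep (sd : PySem.Dict Int Int × PySem.Dict Int Int) (ix : Int × Int) :
    PySem.Dict Int Int × PySem.Dict Int Int :=
  (if sd.1.contains ix.2 then sd.1 else sd.1.insert ix.2 ix.1, sd.2.insert ix.2 ix.1)

def solution (bell : List Int) : Int :=
  let bell2 := bell.map pvMapA
  let accum := bell2.foldl pvAccStep [(0 : Int)]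
  let sd := (PySem.List.enumerate accum 0).foldl pvDictStep (PySem.Dict.empty, PySem.Dict.empty)
  -- max(...) never sees an empty generator (accum is nonempty), so the .getD 0 default is never read
  (PySem.List.max? (sd.2.keys.map (fun x => sd.2.getD x 0 - sd.1.getD x 0)) (fun y => y)).getD 0

-- ===== PORT B =====
-- p.append(p[-1] + (-1 if b == 1 else 1))
def pvAccB (acc : List Int) (b : Int) : List Int :=
  acc ++ [PySem.List.pyGetD acc (-1) 0 + (if b == 1 then (-1 : Int) else 1)]
-- if p[i] == p[j] and j - i > best: best = j - i
def pvPairStep (p : List Int) (j best i : Int) : Int :=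
  if PySem.List.pyGetD p i 0 = PySem.List.pyGetD p j 0 ∧ j - i > best then j - i else best

def solution_alt (bell : List Int) : Int :=
  let p := bell.foldl pvAccB [(0 : Int)]
  (PySem.List.pyRange 0 (p.length : Int) 1).foldl
    (fun best j => (PySem.List.pyRange 0 j 1).foldl (pvPairStep p j) best) 0

-- ===== PRECONDITION & SPEC =====
def Spec_solution (bell : List Int) (out : Int) : Prop := out = solution_alt bell
instance (bell : List Int) (out : Int) : Decidable (Spec_solution bell out) := by unfold Spec_solution; infer_instance

-- ===== CLAIM (what is proved, stated in full; the proofs are below) =====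
def Claim_equal_solution : Prop := ∀ (bell : List Int), Dom_solution bell → Spec_solution bell (solution bell)

-- ===== LEMMAS AND PROOFS =====

-- proof-side abbreviations: both ports as functions of the prefix-sum list p
def pvSDp (p : List Int) : PySem.Dict Int Int × PySem.Dict Int Int :=
  (PySem.List.enumerate p 0).foldl pvDictStep (PySem.Dict.empty, PySem.Dict.empty)
def pvA (p : List Int) : Int :=
  (PySem.List.max? ((pvSDp p).2.keys.map (fun x => (pvSDp p).2.getD x 0 - (pvSDp p).1.getD x 0))
    (fun y => y)).getD 0
def pvB (p : List Int) : Int :=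
  (PySem.List.pyRange 0 (p.length : Int) 1).foldl
    (fun best j => (PySem.List.pyRange 0 j 1).foldl (pvPairStep p j) best) 0
-- an "equal pair" of indices of p
def pvEq (p : List Int) (i j : Int) : Prop :=
  0 ≤ i ∧ i < j ∧ j < (p.length : Int) ∧ PySem.List.pyGetD p i 0 = PySem.List.pyGetD p j 0

lemma pvGetD_append_left (p q : List Int) (k : Int) (h0 : 0 ≤ k) (h : k < (p.length : Int)) :
    PySem.List.pyGetD (p ++ q) k 0 = PySem.List.pyGetD p k 0 := by
  have hk : k.toNat < p.length := by omega
  rw [PySem.List.pyGetD_eq_getElem (p ++ q) 0 h0 (by simp; omega),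
      PySem.List.pyGetD_eq_getElem p 0 h0 h]
  exact List.getElem_append_left hk

lemma pvGetD_append_self (p : List Int) (x : Int) :
    PySem.List.pyGetD (p ++ [x]) (p.length : Int) 0 = x := by
  rw [PySem.List.pyGetD_eq_getElem (p ++ [x]) 0 (by positivity) (by simp)]
  simp

lemma pvGetD_mem (p : List Int) (k : Int) (h0 : 0 ≤ k) (h : k < (p.length : Int)) :
    PySem.List.pyGetD p k 0 ∈ p := by
  rw [PySem.List.pyGetD_eq_getElem p 0 h0 h]
  exact List.getElem_mem _

-- characterization of B's inner loop over any index list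
lemma pvInner (p : List Int) (j : Int) (L : List Int) (b : Int) :
    b ≤ L.foldl (pvPairStep p j) b ∧
    (∀ i ∈ L, PySem.List.pyGetD p i 0 = PySem.List.pyGetD p j 0 →
        j - i ≤ L.foldl (pvPairStep p j) b) ∧
    (L.foldl (pvPairStep p j) b = b ∨
      ∃ i ∈ L, PySem.List.pyGetD p i 0 = PySem.List.pyGetD p j 0 ∧
        L.foldl (pvPairStep p j) b = j - i) := by
  induction L generalizing b with
  | nil => simp
  | cons i t ih =>
    simp only [List.foldl_cons]
    obtain ⟨h1, h2, h3⟩ := ih (pvPairStep p j b i)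
    have hs : b ≤ pvPairStep p j b i ∧
        (PySem.List.pyGetD p i 0 = PySem.List.pyGetD p j 0 → j - i ≤ pvPairStep p j b i) ∧
        (pvPairStep p j b i = b ∨
          (PySem.List.pyGetD p i 0 = PySem.List.pyGetD p j 0 ∧ pvPairStep p j b i = j - i)) := by
      unfold pvPairStep
      split_ifs with hc
      · exact ⟨by omega, fun _ => le_refl _, Or.inr ⟨hc.1, rfl⟩⟩
      · refine ⟨le_refl _, fun he => ?_, Or.inl rfl⟩
        by_cases hgt : j - i > b
        · exact absurd ⟨he, hgt⟩ hc
        · omega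
    refine ⟨le_trans hs.1 h1, ?_, ?_⟩
    · intro i' hi' he
      rcases List.mem_cons.1 hi' with rfl | hi'
      · exact le_trans (hs.2.1 he) h1
      · exact h2 i' hi' he
    · rcases h3 with h3 | ⟨i', hi', he', hv⟩
      · rcases hs.2.2 with hb | ⟨he, hv⟩
        · exact Or.inl (h3.trans hb)
        · exact Or.inr ⟨i, List.mem_cons_self, he, h3.trans hv⟩
      · exact Or.inr ⟨i', List.mem_cons_of_mem _ hi', he', hv⟩

-- characterization of B's outer loop
lemma pvOuter (p : List Int) (L : List Int) (b : Int) :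
    b ≤ L.foldl (fun best j => (PySem.List.pyRange 0 j 1).foldl (pvPairStep p j) best) b ∧
    (∀ j ∈ L, ∀ i : Int, 0 ≤ i → i < j →
        PySem.List.pyGetD p i 0 = PySem.List.pyGetD p j 0 →
        j - i ≤ L.foldl (fun best j => (PySem.List.pyRange 0 j 1).foldl (pvPairStep p j) best) b) ∧
    (L.foldl (fun best j => (PySem.List.pyRange 0 j 1).foldl (pvPairStep p j) best) b = b ∨
      ∃ j ∈ L, ∃ i : Int, 0 ≤ i ∧ i < j ∧
        PySem.List.pyGetD p i 0 = PySem.List.pyGetD p j 0 ∧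
        L.foldl (fun best j => (PySem.List.pyRange 0 j 1).foldl (pvPairStep p j) best) b = j - i) := by
  induction L generalizing b with
  | nil => simp
  | cons j t ih =>
    simp only [List.foldl_cons]
    obtain ⟨g1, g2, g3⟩ := pvInner p j (PySem.List.pyRange 0 j 1) b
    obtain ⟨h1, h2, h3⟩ := ih ((PySem.List.pyRange 0 j 1).foldl (pvPairStep p j) b)
    refine ⟨le_trans g1 h1, ?_, ?_⟩
    · intro j' hj' i h0 hij he
      rcases List.mem_cons.1 hj' with rfl | hj'
      · exact le_trans (g2 i (PySem.List.mem_pyRange_one.2 ⟨h0, hij⟩) he) h1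
      · exact h2 j' hj' i h0 hij he
    · rcases h3 with h3 | ⟨j', hj', i, h0, hij, he, hv⟩
      · rcases g3 with hb | ⟨i, hi, he, hv⟩
        · exact Or.inl (h3.trans hb)
        · obtain ⟨h0, hij⟩ := PySem.List.mem_pyRange_one.1 hi
          exact Or.inr ⟨j, List.mem_cons_self, i, h0, hij, he, h3.trans hv⟩
      · exact Or.inr ⟨j', List.mem_cons_of_mem _ hj', i, h0, hij, he, hv⟩

lemma pvB_spec (p : List Int) :
    0 ≤ pvB p ∧ (∀ i j : Int, pvEq p i j → j - i ≤ pvB p) ∧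
    (pvB p = 0 ∨ ∃ i j : Int, pvEq p i j ∧ pvB p = j - i) := by
  obtain ⟨h1, h2, h3⟩ := pvOuter p (PySem.List.pyRange 0 (p.length : Int) 1) 0
  refine ⟨h1, ?_, ?_⟩
  · intro i j ⟨e0, e1, e2, e3⟩
    exact h2 j (PySem.List.mem_pyRange_one.2 ⟨by omega, e2⟩) i e0 e1 e3
  · rcases h3 with h3 | ⟨j, hj, i, h0, hij, he, hv⟩
    · exact Or.inl h3
    · obtain ⟨_, hjl⟩ := PySem.List.mem_pyRange_one.1 hj
      exact Or.inr ⟨i, j, ⟨h0, hij, hjl, he⟩, hv⟩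

-- invariant: A's two dicts record the first and last occurrence of each prefix value
def pvDInv (p : List Int) : Prop :=
  (pvSDp p).2.keys = (pvSDp p).1.keys ∧
  (pvSDp p).2.keys.Nodup ∧
  (∀ x : Int, x ∈ (pvSDp p).2.keys ↔ x ∈ p) ∧
  (∀ x ∈ (pvSDp p).2.keys,
    0 ≤ (pvSDp p).1.getD x 0 ∧ (pvSDp p).1.getD x 0 ≤ (pvSDp p).2.getD x 0 ∧
    (pvSDp p).2.getD x 0 < (p.length : Int) ∧
    PySem.List.pyGetD p ((pvSDp p).1.getD x 0) 0 = x ∧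
    PySem.List.pyGetD p ((pvSDp p).2.getD x 0) 0 = x ∧
    (∀ k : Int, 0 ≤ k → k < (p.length : Int) → PySem.List.pyGetD p k 0 = x →
      (pvSDp p).1.getD x 0 ≤ k ∧ k ≤ (pvSDp p).2.getD x 0))

lemma pvSDp_snoc (p : List Int) (x : Int) :
    pvSDp (p ++ [x]) = pvDictStep (pvSDp p) ((p.length : Int), x) := by
  rw [pvSDp, PySem.List.enumerate_append, List.foldl_append]
  simp [pvSDp, PySem.List.enumerate_cons, PySem.List.enumerate_nil]

lemma pvDInv_holds (p : List Int) : pvDInv p := by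
  induction p using List.reverseRecOn with
  | nil =>
    refine ⟨by decide, by decide, ?_, ?_⟩
    · intro x
      simp [pvSDp, PySem.List.enumerate_nil, PySem.Dict.keys_empty]
    · intro x hx
      simp [pvSDp, PySem.List.enumerate_nil, PySem.Dict.keys_empty] at hx
  | append_singleton p x ih =>
    obtain ⟨I1, I2, I3, I4⟩ := ih
    have hstep := pvSDp_snoc p x
    set n : Int := (p.length : Int) with hn
    have hlen : ((p ++ [x]).length : Int) = n + 1 := by simp [hn]
    by_cases hc : (pvSDp p).1.contains x = true
    · -- x already seen: start unchanged, end[x] updated to n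
      have hxk1 : x ∈ (pvSDp p).1.keys := (PySem.Dict.contains_iff_mem_keys _ _).1 hc
      have hxk2 : x ∈ (pvSDp p).2.keys := by rw [I1]; exact hxk1
      have hc2 : (pvSDp p).2.contains x = true := (PySem.Dict.contains_iff_mem_keys _ _).2 hxk2
      have hD : pvSDp (p ++ [x]) = ((pvSDp p).1, (pvSDp p).2.insert x n) := by
        rw [hstep]; unfold pvDictStep; simp [hc]
      have hkeys : ((pvSDp p).2.insert x n).keys = (pvSDp p).2.keys :=
        PySem.Dict.keys_insert_of_contains _ _ hc2
      have hxp : x ∈ p := (I3 x).1 hxk2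
      unfold pvDInv
      rw [hD]
      dsimp only
      rw [hkeys]
      refine ⟨I1, I2, ?_, ?_⟩
      · intro y
        rw [I3 y, List.mem_append]
        constructor
        · exact Or.inl
        · rintro (hy | hy)
          · exact hy
          · rw [List.mem_singleton.1 hy]; exact hxp
      · intro y hy
        obtain ⟨f0, f1, f2, f3, f4, f5⟩ := I4 y hy
        rw [PySem.Dict.getD_insert]
        by_cases hyx : y = x
        · subst hyx
          rw [if_pos rfl]
          refine ⟨f0, by omega, by omega, ?_, ?_, ?_⟩
          · rw [pvGetD_append_left p [y] _ f0 (by omega)]; exact f3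
          · exact pvGetD_append_self p y
          · intro k k0 klt hk
            rw [hlen] at klt
            by_cases hkn : k < n
            · rw [pvGetD_append_left p [y] k k0 hkn] at hk
              have := f5 k k0 hkn hk
              omega
            · omega
        · rw [if_neg hyx]
          refine ⟨f0, f1, by omega, ?_, ?_, ?_⟩
          · rw [pvGetD_append_left p [x] _ f0 (by omega)]; exact f3
          · rw [pvGetD_append_left p [x] _ (by omega) (by omega)]; exact f4
          · intro k k0 klt hk
            rw [hlen] at klt
            by_cases hkn : k < n
            · rw [pvGetD_append_left p [x] k k0 hkn] at hk
              exact f5 k k0 hkn hk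
            · have hkn' : k = n := by omega
              rw [hkn', pvGetD_append_self p x] at hk
              exact absurd hk.symm hyx
    · -- x unseen: both dicts gain key x at index n
      have hcf : (pvSDp p).1.contains x = false := by simpa using hc
      have hxk1 : x ∉ (pvSDp p).1.keys := fun hm =>
        hc ((PySem.Dict.contains_iff_mem_keys _ _).2 hm)
      have hxk2 : x ∉ (pvSDp p).2.keys := by rw [I1]; exact hxk1
      have hc2 : (pvSDp p).2.contains x = false := by
        by_contra h
        exact hxk2 ((PySem.Dict.contains_iff_mem_keys _ _).1 (by simpa using h))
      have hxp : x ∉ p := fun hm => hxk2 ((I3 x).2 hm)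
      have hD : pvSDp (p ++ [x]) = ((pvSDp p).1.insert x n, (pvSDp p).2.insert x n) := by
        rw [hstep]; unfold pvDictStep; simp [hcf]
      have hkeys1 : ((pvSDp p).1.insert x n).keys = (pvSDp p).1.keys ++ [x] :=
        PySem.Dict.keys_insert_of_not_contains _ _ hcf
      have hkeys2 : ((pvSDp p).2.insert x n).keys = (pvSDp p).2.keys ++ [x] :=
        PySem.Dict.keys_insert_of_not_contains _ _ hc2
      unfold pvDInv
      rw [hD]
      dsimp only
      rw [hkeys2]
      refine ⟨by rw [hkeys1, I1], ?_, ?_, ?_⟩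
      · simp only [List.nodup_append, I2, List.nodup_cons, List.not_mem_nil, not_false_eq_true,
          List.nodup_nil, and_true, true_and]
        exact fun a ha b hb => by rw [List.mem_singleton.1 hb]; exact fun h => hxk2 (h ▸ ha)
      · intro y
        simp only [List.mem_append, List.mem_singleton, I3 y]
      · intro y hy
        rw [PySem.Dict.getD_insert, PySem.Dict.getD_insert]
        rcases List.mem_append.1 hy with hy | hy
        · have hyx : y ≠ x := fun h => hxk2 (h ▸ hy)
          rw [if_neg hyx, if_neg hyx]
          obtain ⟨f0, f1, f2, f3, f4, f5⟩ := I4 y hy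
          refine ⟨f0, f1, by omega, ?_, ?_, ?_⟩
          · rw [pvGetD_append_left p [x] _ f0 (by omega)]; exact f3
          · rw [pvGetD_append_left p [x] _ (by omega) (by omega)]; exact f4
          · intro k k0 klt hk
            rw [hlen] at klt
            by_cases hkn : k < n
            · rw [pvGetD_append_left p [x] k k0 hkn] at hk
              exact f5 k k0 hkn hk
            · have hkn' : k = n := by omega
              rw [hkn', pvGetD_append_self p x] at hk
              exact absurd hk.symm hyx
        · have hyx : y = x := List.mem_singleton.1 hy
          subst hyx
          rw [if_pos rfl, if_pos rfl]
          refine ⟨by positivity, le_refl _, by omega, pvGetD_append_self p y,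
            pvGetD_append_self p y, ?_⟩
          intro k k0 klt hk
          rw [hlen] at klt
          by_cases hkn : k < n
          · rw [pvGetD_append_left p [y] k k0 hkn] at hk
            exact absurd (hk ▸ pvGetD_mem p k k0 hkn) hxp
          · omega

-- the core equality, for any nonempty prefix list
lemma pv_core (p : List Int) (hp : p ≠ []) : pvA p = pvB p := by
  obtain ⟨I1, I2, I3, I4⟩ := pvDInv_holds p
  obtain ⟨hB0, hBub, hBach⟩ := pvB_spec p
  -- the diff list is nonempty, so max? returns its maximum m
  have hkne : (pvSDp p).2.keys ≠ [] := by
    obtain ⟨a, t, rfl⟩ : ∃ a t, p = a :: t := by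
      cases p with
      | nil => exact absurd rfl hp
      | cons a t => exact ⟨a, t, rfl⟩
    intro h
    exact (List.ne_nil_iff_exists_cons.2 ⟨a, t, rfl⟩) (List.eq_nil_iff_forall_not_mem.2
      (fun y hy => by rw [← I3 y, h] at hy; exact List.not_mem_nil hy) )
  set diffs := (pvSDp p).2.keys.map (fun x => (pvSDp p).2.getD x 0 - (pvSDp p).1.getD x 0)
    with hdiffs
  cases hm : PySem.List.max? diffs (fun y => y) with
  | none =>
    exact absurd (List.map_eq_nil_iff.1 ((PySem.List.max?_eq_none_iff _ _).1 hm)) hkne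
  | some m =>
    have hAm : pvA p = m := by rw [pvA, ← hdiffs, hm]; rfl
    have hmmem : m ∈ diffs := PySem.List.max?_mem hm
    have hmax : ∀ y ∈ diffs, y ≤ m := fun y hy => PySem.List.max?_isMax hm y hy
    obtain ⟨xm, hxm, hxv⟩ := List.mem_map.1 hmmem
    obtain ⟨f0, f1, f2, f3, f4, f5⟩ := I4 xm hxm
    -- pvA ≤ pvB
    have hAB : m ≤ pvB p := by
      rcases eq_or_lt_of_le f1 with heq | hlt
      · omega
      · have := hBub ((pvSDp p).1.getD xm 0) ((pvSDp p).2.getD xm 0)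
          ⟨f0, hlt, f2, by rw [f3, f4]⟩
        omega
    -- pvB ≤ pvA
    have hBA : pvB p ≤ m := by
      rcases hBach with h0 | ⟨i, j, ⟨e0, e1, e2, e3⟩, hv⟩
      · omega
      · set x := PySem.List.pyGetD p j 0 with hx
        have hxmem : x ∈ p := pvGetD_mem p j (by omega) e2
        have hxk : x ∈ (pvSDp p).2.keys := (I3 x).2 hxmem
        obtain ⟨g0, g1, g2, g3, g4, g5⟩ := I4 x hxk
        have hi := g5 i e0 (by omega) e3
        have hj := g5 j (by omega) e2 rfl
        have hd : (pvSDp p).2.getD x 0 - (pvSDp p).1.getD x 0 ∈ diffs :=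
          List.mem_map.2 ⟨x, hxk, rfl⟩
        have := hmax _ hd
        omega
    rw [hAm]
    omega

lemma pvAccB_ne_nil (l : List Int) (init : List Int) (h : init ≠ []) :
    l.foldl pvAccB init ≠ [] := by
  induction l generalizing init with
  | nil => exact h
  | cons b t ih =>
    rw [List.foldl_cons]
    exact ih _ (by simp [pvAccB])

lemma pvAcc_eq (bell : List Int) :
    (bell.map pvMapA).foldl pvAccStep [(0 : Int)] = bell.foldl pvAccB [(0 : Int)] := by
  rw [List.foldl_map]
  rfl

theorem pv_main (bell : List Int) : solution bell = solution_alt bell := by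
  have hA : solution bell = pvA ((bell.map pvMapA).foldl pvAccStep [(0 : Int)]) := rfl
  have hB : solution_alt bell = pvB (bell.foldl pvAccB [(0 : Int)]) := rfl
  rw [hA, hB, pvAcc_eq]
  exact pv_core _ (pvAccB_ne_nil bell [(0 : Int)] (by simp))

-- ===== VERDICT (by name: the statement is the Claim_ definition above) =====
theorem solution_spec : Claim_equal_solution := by
  intro bell _
  unfold Spec_solution
  exact pv_main bell
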